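-- pv_equiv track=rewrite | github.com/durian0439-hub/bunyang_longtail | src/bunyang_longtail/naver_bundle_publish.py | _normalize_section_lines
-- ===== SOURCE A (Python) =====
-- def _normalize_section_lines(lines: list[str]) -> list[str]:
--     normalized: list[str] = []
--     previous_blank = False
--     for raw_line in lines:
--         line = raw_line.rstrip()
--         if not line.strip():
--             if previous_blank:
--                 continue
--             normalized.append("")
--             previous_blank = True
--             continue
--         normalized.append(line.strip())
--         previous_blank = False
--     while normalized and not normalized[0].strip():
--         normalized.pop(0)
--     while normalized and not normalized[-1].strip():
--         normalized.pop()
--     return normalized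
-- ===== SOURCE B (Python) =====
-- def _normalize_section_lines(lines: list[str]) -> list[str]:
--     # Split into paragraphs (maximal runs of non-blank stripped lines), then
--     # join the paragraphs with a single blank-line separator.
--     paragraphs: list[list[str]] = []
--     current: list[str] = []
--     for line in lines:
--         s = line.strip()
--         if s:
--             current.append(s)
--         elif current:
--             paragraphs.append(current)
--             current = []
--     if current:
--         paragraphs.append(current)
--     out: list[str] = []
--     for para in paragraphs:
--         if out:
--             out.append("")
--         out.extend(para)
--     return out
-- ===== Notes on version B (the rewrite author's own statement) =====
-- stated objective: alternative
-- what changed: B splits the input into a list of paragraphs (maximal runs of stripped non-blank lines) and then joins the paragraphs with single blank-line separators, instead of A's one-pass previous_blank-flag loop followed by two edge-trimming while-pop loops.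
import Mathlib
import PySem

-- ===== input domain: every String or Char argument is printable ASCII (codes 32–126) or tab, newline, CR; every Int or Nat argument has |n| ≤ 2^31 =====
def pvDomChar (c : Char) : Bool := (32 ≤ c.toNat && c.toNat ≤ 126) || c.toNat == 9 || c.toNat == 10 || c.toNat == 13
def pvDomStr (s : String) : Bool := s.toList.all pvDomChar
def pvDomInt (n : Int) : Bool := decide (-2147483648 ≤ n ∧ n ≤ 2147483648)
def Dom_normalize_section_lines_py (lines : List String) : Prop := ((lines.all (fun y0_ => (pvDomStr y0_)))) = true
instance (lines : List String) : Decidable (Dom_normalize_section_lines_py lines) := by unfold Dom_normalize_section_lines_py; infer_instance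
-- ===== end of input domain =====

-- B splits the input into paragraphs (maximal runs of stripped non-blank lines) and joins them with
-- single blank separators, instead of A's previous_blank-flag pass plus two edge-trimming while loops;
-- objective: alternative decomposition, same cost.

-- ===== PORT A =====
-- literal port of A: one pass appending to `normalized` with a `previous_blank` flag,
-- then the two while-pop loops (pop(0) while first blank = dropWhile; pop() while last blank
-- = reverse, dropWhile, reverse).
def pvStepA (st : List String × Bool) (raw_line : String) : List String × Bool :=
  let line := PySem.Str.rstrip raw_line
  if PySem.Str.strip line == "" then
    if st.2 then st else (st.1 ++ [""], true)
  else
    (st.1 ++ [PySem.Str.strip line], false)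

def normalize_section_lines_py (lines : List String) : List String :=
  let st := lines.foldl pvStepA ([], false)
  let n1 := st.1.dropWhile (fun s => PySem.Str.strip s == "")
  (n1.reverse.dropWhile (fun s => PySem.Str.strip s == "")).reverse

-- ===== PORT B =====
-- first loop of Source B: build `paragraphs` (with the trailing flush of `current`);
-- second loop: join with a single "" between consecutive paragraphs (`if out:` test).
def pvStepB (st : List (List String) × List String) (line : String) : List (List String) × List String :=
  let s := PySem.Str.strip line
  if s ≠ "" then (st.1, st.2 ++ [s])
  else if st.2 ≠ [] then (st.1 ++ [st.2], ([] : List String))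
  else st

def normalize_section_lines_py_alt (lines : List String) : List String :=
  let st := lines.foldl pvStepB ([], [])
  let paragraphs := if st.2 ≠ [] then st.1 ++ [st.2] else st.1
  paragraphs.foldl (fun out p => (if out.isEmpty then out else out ++ [""]) ++ p) []

-- ===== PRECONDITION & SPEC =====
def Spec_normalize_section_lines_py (lines : List String) (out : List String) : Prop := out = normalize_section_lines_py_alt lines
instance (lines : List String) (out : List String) : Decidable (Spec_normalize_section_lines_py lines out) := by unfold Spec_normalize_section_lines_py; infer_instance

-- ===== CLAIM (what is proved, stated in full; the proofs are below) =====
def Claim_equal_normalize_section_lines_py : Prop := ∀ (lines : List String), Dom_normalize_section_lines_py lines → Spec_normalize_section_lines_py lines (normalize_section_lines_py lines)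

-- ===== LEMMAS AND PROOFS =====

theorem rstrip_chars_idem (l : List Char) :
    PySem.Chars.rstrip (PySem.Chars.rstrip l) = PySem.Chars.rstrip l := by
  simp [PySem.Chars.rstrip, List.dropWhile_idempotent]

theorem lstrip_rstrip_comm (l : List Char) :
    PySem.Chars.lstrip (PySem.Chars.rstrip l) = PySem.Chars.rstrip (PySem.Chars.lstrip l) := by
  induction l with
  | nil => simp [PySem.Chars.lstrip, PySem.Chars.rstrip]
  | cons x xs ih =>
    by_cases hrs : PySem.Chars.rstrip xs = []
    · have hall : ∀ c ∈ xs, PySem.Chars.isspace c = true := by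
        intro c hc
        have := List.dropWhile_eq_nil_iff.mp (by
          simpa [PySem.Chars.rstrip, List.reverse_eq_nil_iff] using hrs)
        exact this c (by simpa using hc)
      have hls : List.dropWhile PySem.Chars.isspace xs = [] :=
        List.dropWhile_eq_nil_iff.mpr hall
      have hdw : List.dropWhile PySem.Chars.isspace xs.reverse = [] := by
        simpa [PySem.Chars.rstrip, List.reverse_eq_nil_iff] using hrs
      by_cases hx : PySem.Chars.isspace x = true
      · simp [PySem.Chars.rstrip, PySem.Chars.lstrip, List.dropWhile_append, hdw, hx, hls]
      · simp [PySem.Chars.rstrip, PySem.Chars.lstrip, List.dropWhile_append, hdw, hx]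
    · have hdw : List.dropWhile PySem.Chars.isspace xs.reverse ≠ [] := by
        intro h; exact hrs (by simp [PySem.Chars.rstrip, h])
      have hcons : PySem.Chars.rstrip (x :: xs) = x :: PySem.Chars.rstrip xs := by
        simp [PySem.Chars.rstrip, List.dropWhile_append, List.isEmpty_iff, hdw]
      by_cases hx : PySem.Chars.isspace x = true
      · rw [hcons]
        simp only [PySem.Chars.lstrip, List.dropWhile_cons, hx]
        rw [show List.dropWhile PySem.Chars.isspace (PySem.Chars.rstrip xs)
              = PySem.Chars.lstrip (PySem.Chars.rstrip xs) from rfl, ih]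
        rfl
      · rw [hcons]
        simp [PySem.Chars.lstrip, hx, hcons]

theorem strip_rstrip (s : String) : PySem.Str.strip (PySem.Str.rstrip s) = PySem.Str.strip s := by
  apply String.toList_inj.mp
  rw [PySem.Str.toList_strip, PySem.Str.toList_strip, PySem.Str.toList_rstrip]
  show PySem.Chars.rstrip (PySem.Chars.lstrip (PySem.Chars.rstrip s.toList)) = _
  rw [lstrip_rstrip_comm, rstrip_chars_idem]
  rfl

theorem strip_idem (s : String) : PySem.Str.strip (PySem.Str.strip s) = PySem.Str.strip s := by
  apply String.toList_inj.mp
  rw [PySem.Str.toList_strip, PySem.Str.toList_strip]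
  show PySem.Chars.rstrip (PySem.Chars.lstrip (PySem.Chars.rstrip (PySem.Chars.lstrip s.toList))) = _
  rw [lstrip_rstrip_comm, rstrip_chars_idem]
  show PySem.Chars.rstrip (PySem.Chars.lstrip (PySem.Chars.lstrip s.toList)) = _
  simp only [PySem.Chars.lstrip, List.dropWhile_idempotent]
  rfl

theorem strip_empty : PySem.Str.strip "" = "" := by decide

-- pure recursive form of A's main loop
def pvFA : List String → Bool → List String
  | [], _ => []
  | x :: xs, pb =>
    if x == "" then (if pb then pvFA xs true else "" :: pvFA xs true)
    else x :: pvFA xs false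

theorem foldA_eq (ls : List String) : ∀ (acc : List String) (pb : Bool),
    (ls.foldl pvStepA (acc, pb)).1 = acc ++ pvFA (ls.map PySem.Str.strip) pb := by
  induction ls with
  | nil => simp [pvFA]
  | cons x xs ih =>
    intro acc pb
    rw [List.foldl_cons]
    by_cases hx : PySem.Str.strip x = ""
    · cases pb with
      | true =>
        have hstep : pvStepA (acc, true) x = (acc, true) := by
          simp [pvStepA, strip_rstrip, hx]
        rw [hstep, ih]
        simp [pvFA, hx]
      | false =>
        have hstep : pvStepA (acc, false) x = (acc ++ [""], true) := by
          simp [pvStepA, strip_rstrip, hx]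
        rw [hstep, ih]
        simp [pvFA, hx]
    · have hstep : pvStepA (acc, pb) x = (acc ++ [PySem.Str.strip x], false) := by
        simp [pvStepA, strip_rstrip, hx]
      rw [hstep, ih]
      simp [pvFA, hx]

theorem fa_true_dropWhile (l : List String) :
    pvFA l true = pvFA (l.dropWhile (· == "")) true := by
  induction l with
  | nil => rfl
  | cons x xs ih =>
    by_cases hx : x = ""
    · simp [pvFA, hx, ih]
    · simp [pvFA, hx]

theorem fa_dropWhile_flag (l : List String) :
    pvFA (l.dropWhile (· == "")) true = pvFA (l.dropWhile (· == "")) false := by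
  induction l with
  | nil => rfl
  | cons x xs ih =>
    by_cases hx : x = ""
    · simpa [hx] using ih
    · simp [hx, pvFA]

-- collapse of blank runs, as structural recursion (proof-side normal form of A's loop)
def pvCollapse : List String → List String
  | [] => []
  | s :: ss =>
    if s == "" then "" :: pvCollapse (ss.dropWhile (· == ""))
    else s :: pvCollapse ss
termination_by l => l.length
decreasing_by
  · have := List.length_dropWhile_le (· == "") ss; simp; omega
  · simp

theorem collapse_eq_fa (l : List String) : pvCollapse l = pvFA l false := by
  induction l using pvCollapse.induct with
  | case1 => simp [pvCollapse, pvFA]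
  | case2 s ss h ih =>
    have hs : s = "" := by simpa using h
    rw [pvCollapse, if_pos h, ih, ← fa_dropWhile_flag, ← fa_true_dropWhile]
    simp [pvFA, hs]
  | case3 s ss h ih =>
    have hs : ¬ s = "" := by simpa using h
    rw [pvCollapse, if_neg h, ih]
    simp [pvFA, hs]

theorem mem_collapse {e : String} : ∀ {l : List String}, e ∈ pvCollapse l → e = "" ∨ e ∈ l := by
  intro l
  induction l using pvCollapse.induct with
  | case1 => simp [pvCollapse]
  | case2 s ss h ih =>
    rw [pvCollapse, if_pos h]
    intro hm
    rcases List.mem_cons.mp hm with h1 | h1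
    · exact Or.inl h1
    · rcases ih h1 with h2 | h2
      · exact Or.inl h2
      · exact Or.inr (List.mem_cons_of_mem _ (List.dropWhile_subset _ h2))
  | case3 s ss h ih =>
    rw [pvCollapse, if_neg h]
    intro hm
    rcases List.mem_cons.mp hm with h1 | h1
    · exact Or.inr (h1 ▸ List.mem_cons_self)
    · rcases ih h1 with h2 | h2
      · exact Or.inl h2
      · exact Or.inr (List.mem_cons_of_mem _ h2)

theorem head?_collapse (l : List String) : (pvCollapse l).head? = l.head? := by
  induction l using pvCollapse.induct with
  | case1 => simp [pvCollapse]
  | case2 s ss h ih =>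
    have hs : s = "" := by simpa using h
    rw [pvCollapse, if_pos h]; simp [hs]
  | case3 s ss h ih => rw [pvCollapse, if_neg h]; simp

theorem head?_dropWhile_ne (l : List String) (b : String)
    (h : (l.dropWhile (· == "")).head? = some b) : b ≠ "" := by
  induction l with
  | nil => simp at h
  | cons x xs ih =>
    by_cases hx : x = ""
    · rw [List.dropWhile_cons, if_pos (by simp [hx])] at h; exact ih h
    · rw [List.dropWhile_cons, if_neg (by simp [hx])] at h
      rw [List.head?_cons] at h
      obtain rfl := Option.some_inj.mp h
      exact hx

def pvNB (s : String) : Bool := !(s == "")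

theorem head_dropWhile_ne' (xs : List String) (a : String) (ds : List String)
    (h : xs.dropWhile pvNB = a :: ds) : a = "" := by
  induction xs with
  | nil => simp at h
  | cons x r ih =>
    by_cases hx : x = ""
    · rw [List.dropWhile_cons, if_neg (by simp [pvNB, hx])] at h
      exact (List.cons.injEq .. ▸ h).1.symm ▸ hx
    · rw [List.dropWhile_cons, if_pos (by simp [pvNB, hx])] at h
      exact ih h

theorem dropWhile_congr_mem {α : Type} (p q : α → Bool) :
    ∀ (l : List α), (∀ e ∈ l, p e = q e) → l.dropWhile p = l.dropWhile q := by
  intro l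
  induction l with
  | nil => intro _; rfl
  | cons x xs ih =>
    intro h
    rw [List.dropWhile_cons, List.dropWhile_cons, h x (by simp)]
    split
    · exact ih (fun e he => h e (List.mem_cons_of_mem _ he))
    · rfl

theorem dropWhile_of_all_ne (l : List String) (h : ∀ e ∈ l, ¬ e = "") :
    l.dropWhile (· == "") = l := by
  cases l with
  | nil => rfl
  | cons x xs =>
    rw [List.dropWhile_cons, if_neg (by simpa using h x (by simp))]

theorem collapse_nil_iff (l : List String) (h : pvCollapse l = []) : l = [] := by
  cases l with
  | nil => rfl
  | cons x xs =>
    exfalso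
    have := head?_collapse (x :: xs)
    rw [h] at this
    simp at this

-- collapse passes over a non-blank prefix unchanged
theorem collapse_nonblank_prefix (t : List String) (d : List String)
    (ht : ∀ e ∈ t, ¬ e = "") : pvCollapse (t ++ d) = t ++ pvCollapse d := by
  induction t with
  | nil => simp
  | cons a t' ih =>
    have ha : ¬ a = "" := ht a (by simp)
    rw [List.cons_append, pvCollapse, if_neg (by simpa using ha),
        ih (fun e he => ht e (List.mem_cons_of_mem _ he))]
    rfl

-- the paragraph decomposition (proof-side normal form of B's first loop)
def pvParas : List String → List (List String)
  | [] => []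
  | x :: xs =>
    if pvNB x then (x :: xs.takeWhile pvNB) :: pvParas (xs.dropWhile pvNB)
    else pvParas xs
termination_by l => l.length
decreasing_by
  · have := List.length_dropWhile_le pvNB xs; simp; omega
  · simp

theorem paras_dropWhile_blank (l : List String) :
    pvParas (l.dropWhile (· == "")) = pvParas l := by
  induction l with
  | nil => rfl
  | cons x xs ih =>
    by_cases hx : x = ""
    · subst hx; simp [pvParas, pvNB, ih]
    · simp [hx]

theorem paras_unfold (l : List String) :
    pvParas l = (if l.takeWhile pvNB = [] then [] else [l.takeWhile pvNB])
      ++ pvParas (l.dropWhile pvNB) := by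
  cases l with
  | nil => rfl
  | cons x xs =>
    by_cases hx : x = ""
    · subst hx; simp [pvParas, pvNB]
    · simp [pvParas, pvNB, hx]

theorem paras_ne_nil : ∀ (l : List String), ∀ p ∈ pvParas l, p ≠ [] := by
  intro l
  induction l using pvParas.induct with
  | case1 => simp [pvParas]
  | case2 x xs h ih =>
    rw [pvParas, if_pos h]
    intro p hp
    rcases List.mem_cons.mp hp with h1 | h1
    · simp [h1]
    · exact ih p h1
  | case3 x xs h ih =>
    rw [pvParas, if_neg h]
    exact ih

-- recursive form of B's first loop (with the final flush)
def pvG : List String → List String → List (List String)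
  | [], cur => if cur = [] then [] else [cur]
  | x :: xs, cur =>
    if pvNB x then pvG xs (cur ++ [x])
    else if cur ≠ [] then cur :: pvG xs []
    else pvG xs []

theorem foldB_eq (lines : List String) : ∀ (P : List (List String)) (C : List String),
    (let st := lines.foldl pvStepB (P, C);
     if st.2 ≠ [] then st.1 ++ [st.2] else st.1)
    = P ++ pvG (lines.map PySem.Str.strip) C := by
  induction lines with
  | nil =>
    intro P C
    simp only [List.foldl_nil, List.map_nil, pvG]
    split <;> simp_all
  | cons x xs ih =>
    intro P C
    rw [List.foldl_cons, List.map_cons]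
    by_cases hx : PySem.Str.strip x = ""
    · by_cases hc : C = []
      · have hstep : pvStepB (P, C) x = (P, C) := by
          simp [pvStepB, hx, hc]
        rw [hstep, ih, pvG, if_neg (by simp [pvNB, hx]), if_neg (by simp [hc]), hc]
      · have hstep : pvStepB (P, C) x = (P ++ [C], []) := by
          simp [pvStepB, hx, hc]
        rw [hstep, ih, pvG, if_neg (by simp [pvNB, hx]), if_pos hc]
        simp
    · have hstep : pvStepB (P, C) x = (P, C ++ [PySem.Str.strip x]) := by
        simp [pvStepB, hx]
      rw [hstep, ih, pvG, if_pos (by simp [pvNB, hx])]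

theorem pvG_eq_paras (m : List String) : ∀ (C : List String),
    pvG m C = (if C ++ m.takeWhile pvNB = [] then [] else [C ++ m.takeWhile pvNB])
      ++ pvParas (m.dropWhile pvNB) := by
  induction m with
  | nil =>
    intro C
    by_cases hc : C = [] <;> simp [pvG, pvParas, hc]
  | cons x xs ih =>
    intro C
    have h1 : pvG xs [] = pvParas xs := by
      rw [ih [], List.nil_append, ← paras_unfold]
    by_cases hx : x = ""
    · subst hx
      by_cases hc : C = []
      · subst hc; simp [pvG, pvNB, h1, pvParas]
      · simp [pvG, pvNB, h1, pvParas, hc]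
    · rw [show pvG (x :: xs) C = pvG xs (C ++ [x]) from by simp [pvG, pvNB, hx],
          ih (C ++ [x])]
      simp [pvNB, hx]

-- join of nonempty paragraphs
def pvJn : List (List String) → List String
  | [] => []
  | p :: ps => p ++ ps.flatMap (fun q => "" :: q)

theorem joinFold_aux (ps : List (List String)) : ∀ (acc : List String), acc ≠ [] →
    ps.foldl (fun out p => (if out.isEmpty then out else out ++ [""]) ++ p) acc
      = acc ++ ps.flatMap (fun q => "" :: q) := by
  induction ps with
  | nil => simp
  | cons p ps ih =>
    intro acc hacc
    rw [List.foldl_cons]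
    have h1 : (if acc.isEmpty then acc else acc ++ [""]) ++ p = acc ++ "" :: p := by
      rw [if_neg (by simpa [List.isEmpty_iff] using hacc)]; simp
    rw [h1, ih _ (by simp)]
    simp

theorem joinFold_eq (ps : List (List String)) (h : ∀ p ∈ ps, p ≠ []) :
    ps.foldl (fun out p => (if out.isEmpty then out else out ++ [""]) ++ p) []
      = pvJn ps := by
  cases ps with
  | nil => rfl
  | cons p rest =>
    rw [List.foldl_cons]
    have h0 : (if ([] : List String).isEmpty then ([] : List String) else [] ++ [""]) ++ p = p := by
      simp
    rw [h0, joinFold_aux rest p (h p (by simp)), pvJn]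

-- back trim
def pvTB (v : List String) : List String := (v.reverse.dropWhile (· == "")).reverse

theorem pvTB_all_ne (v : List String) (h : ∀ e ∈ v, ¬ e = "") : pvTB v = v := by
  rw [pvTB, dropWhile_of_all_ne _ (fun e he => h e (List.mem_reverse.mp he)), List.reverse_reverse]

theorem pvTB_append (u v : List String) (h : v.reverse.dropWhile (· == "") ≠ []) :
    pvTB (u ++ v) = u ++ pvTB v := by
  rw [pvTB, List.reverse_append, List.dropWhile_append,
      if_neg (by simpa [List.isEmpty_iff] using h)]
  simp [pvTB]

-- main bridge: trimmed collapse = joined paragraphs, for lists not starting blank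
theorem collapse_trim_eq_jn : ∀ (n : Nat) (l : List String), l.length ≤ n →
    l.head? ≠ some "" → pvTB (pvCollapse l) = pvJn (pvParas l) := by
  intro n
  induction n with
  | zero =>
    intro l hl _
    have : l = [] := List.length_eq_zero_iff.mp (Nat.le_zero.mp hl)
    subst this; simp [pvCollapse, pvParas, pvTB, pvJn]
  | succ n ih =>
    intro l hl hhd
    cases l with
    | nil => simp [pvCollapse, pvParas, pvTB, pvJn]
    | cons x xs =>
      have hx : ¬ x = "" := by intro h; exact hhd (by simp [h])
      set t := xs.takeWhile pvNB with ht
      set d := xs.dropWhile pvNB with hd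
      have hxs : xs = t ++ d := (List.takeWhile_append_dropWhile).symm
      have htne : ∀ e ∈ t, ¬ e = "" := by
        intro e he
        have := List.mem_takeWhile_imp (ht ▸ he)
        simpa [pvNB] using this
      have hcol : pvCollapse (x :: xs) = x :: (t ++ pvCollapse d) := by
        rw [pvCollapse, if_neg (by simpa using hx)]
        rw [hxs, collapse_nonblank_prefix t d htne]
      have hpar : pvParas (x :: xs) = (x :: t) :: pvParas d := by
        rw [pvParas, if_pos (by simp [pvNB, hx])]
      cases hdc : d with
      | nil =>
        rw [hcol, hdc, pvCollapse, hpar, hdc, pvParas]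
        simp only [pvJn, List.flatMap_nil, List.append_nil]
        exact pvTB_all_ne _ (by
          intro e he
          rcases List.mem_cons.mp (by simpa using he) with h1 | h1
          · exact h1 ▸ hx
          · exact htne e (by simpa using h1))
      | cons a ds =>
        have ha : a = "" := head_dropWhile_ne' xs a ds (hd ▸ hdc)
        subst ha
        have hcd : pvCollapse d = "" :: pvCollapse (ds.dropWhile (· == "")) := by
          rw [hdc, pvCollapse, if_pos (by simp)]
        set dd := ds.dropWhile (· == "") with hdd
        have hlen : dd.length ≤ n := by
          have h1 : dd.length ≤ ds.length := List.length_dropWhile_le _ ds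
          have h2 : d.length ≤ xs.length := List.length_dropWhile_le _ xs
          rw [hdc] at h2
          simp only [List.length_cons] at h2 hl
          omega
        cases hddc : pvCollapse dd with
        | nil =>
          have hddnil : dd = [] := collapse_nil_iff _ hddc
          have hpdd : pvParas d = [] := by
            rw [hdc, pvParas, if_neg (by simp [pvNB]), ← paras_dropWhile_blank, ← hdd, hddnil, pvParas]
          rw [hcol, hcd, hddc, hpar, hpdd]
          simp only [pvJn, List.flatMap_nil, List.append_nil]
          -- pvTB (x :: t ++ [""]) = x :: t
          have hrev : (x :: (t ++ [""])).reverse = "" :: (t.reverse ++ [x]) := by simp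
          rw [pvTB, hrev, List.dropWhile_cons, if_pos (by simp)]
          rw [dropWhile_of_all_ne _ (by
            intro e he
            rcases List.mem_append.mp he with h1 | h1
            · exact htne e (List.mem_reverse.mp h1)
            · simpa using (List.mem_singleton.mp h1) ▸ hx)]
          simp
        | cons y ys =>
          have hy : y ≠ "" := by
            have hh : dd.head? = some y := by
              rw [← head?_collapse, hddc, List.head?_cons]
            exact head?_dropWhile_ne ds y (hdd ▸ hh)
          have hddhd : dd.head? ≠ some "" := by
            rw [← head?_collapse, hddc]; simpa using hy
          have ihdd := ih dd hlen hddhd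
          -- paragraphs of d are the paragraphs of dd
          have hpdd : pvParas d = pvParas dd := by
            rw [hdc, pvParas, if_neg (by simp [pvNB]), ← paras_dropWhile_blank ds]
          -- pvParas dd is nonempty with nonempty head
          have hddne : dd ≠ [] := by
            intro h; rw [h] at hddc; simp [pvCollapse] at hddc
          obtain ⟨z, zs, hzz⟩ := List.exists_cons_of_ne_nil hddne
          have hz : ¬ z = "" := by
            have : dd.head? = some z := by rw [hzz]; rfl
            intro h; exact hddhd (h ▸ this)
          have hpddc : pvParas dd = (z :: zs.takeWhile pvNB) :: pvParas (zs.dropWhile pvNB) := by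
            rw [hzz, pvParas, if_pos (by simp [pvNB, hz])]
          have hjnne : pvJn (pvParas dd) ≠ [] := by
            rw [hpddc, pvJn]; simp
          have htbne : (pvCollapse dd).reverse.dropWhile (· == "") ≠ [] := by
            intro h
            have : pvTB (pvCollapse dd) = [] := by rw [pvTB, h]; rfl
            rw [ihdd] at this
            exact hjnne this
          rw [hcol, hcd, hpar, hpdd]
          rw [show x :: (t ++ "" :: pvCollapse dd) = (x :: t ++ [""]) ++ pvCollapse dd by simp]
          rw [pvTB_append _ _ htbne, ihdd]
          rw [pvJn, hpddc, pvJn]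
          simp

-- front trim on the collapse
theorem collapse_dropWhile (l : List String) :
    (pvCollapse l).dropWhile (· == "") = pvCollapse (l.dropWhile (· == "")) := by
  cases l with
  | nil => simp [pvCollapse]
  | cons x xs =>
    by_cases hx : x = ""
    · rw [pvCollapse, if_pos (by simp [hx]), List.dropWhile_cons, if_pos (by simp),
          List.dropWhile_cons, if_pos (by simp [hx])]
      cases hc : pvCollapse (xs.dropWhile (· == "")) with
      | nil => rfl
      | cons y ys =>
        have hy : y ≠ "" := by
          have : (xs.dropWhile (· == "")).head? = some y := by
            rw [← head?_collapse, hc]; rfl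
          exact head?_dropWhile_ne xs y this
        rw [List.dropWhile_cons, if_neg (by simpa using hy)]
    · rw [pvCollapse, if_neg (by simpa using hx), List.dropWhile_cons,
          if_neg (by simpa using hx), List.dropWhile_cons, if_neg (by simp [hx]),
          pvCollapse, if_neg (by simpa using hx)]

theorem strip_fix_collapse (lines : List String) (e : String)
    (he : e ∈ pvCollapse (lines.map PySem.Str.strip)) : PySem.Str.strip e = e := by
  rcases mem_collapse he with h1 | h1
  · rw [h1]; exact strip_empty
  · rcases List.mem_map.mp h1 with ⟨x, _, hx⟩
    rw [← hx]; exact strip_idem x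

-- ===== VERDICT (by name: the statement is the Claim_ definition above) =====
theorem normalize_section_lines_py_spec : Claim_equal_normalize_section_lines_py := by
  intro lines _
  unfold Spec_normalize_section_lines_py
  simp only [normalize_section_lines_py, normalize_section_lines_py_alt]
  set m := lines.map PySem.Str.strip with hm
  -- A side
  have hA1 : (lines.foldl pvStepA ([], false)).1 = pvCollapse m := by
    rw [foldA_eq lines [] false, collapse_eq_fa, List.nil_append]
  have hfix : ∀ e ∈ pvCollapse m, (fun s => PySem.Str.strip s == "") e = (fun s => s == "") e := by
    intro e he
    simp only []
    rw [strip_fix_collapse lines e (hm ▸ he)]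
  rw [hA1, dropWhile_congr_mem _ _ _ hfix, collapse_dropWhile]
  set md := m.dropWhile (· == "") with hmd
  have hfix2 : ∀ e ∈ (pvCollapse md).reverse,
      (fun s => PySem.Str.strip s == "") e = (fun s => s == "") e := by
    intro e he
    simp only []
    have hmem : e ∈ pvCollapse md := List.mem_reverse.mp he
    rcases mem_collapse hmem with h1 | h1
    · rw [h1, strip_empty]
    · have : e ∈ m := List.dropWhile_subset _ (hmd ▸ h1)
      rcases List.mem_map.mp (hm ▸ this) with ⟨x, _, hx⟩
      rw [← hx, strip_idem x]
  rw [dropWhile_congr_mem _ _ _ hfix2]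
  have hmdhd : md.head? ≠ some "" := by
    intro h
    exact head?_dropWhile_ne m "" h rfl
  have hA := collapse_trim_eq_jn md.length md le_rfl hmdhd
  rw [show ((pvCollapse md).reverse.dropWhile (· == "")).reverse = pvTB (pvCollapse md) from rfl, hA]
  -- B side
  have hB1 := foldB_eq lines [] []
  simp only [List.nil_append] at hB1
  rw [hB1, pvG_eq_paras, List.nil_append, ← paras_unfold, ← hm,
      joinFold_eq _ (paras_ne_nil m), ← paras_dropWhile_blank m, ← hmd]
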